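-- pv_equiv track=rewrite | github.com/andrea-t94/airflow-net | research/data/lib/mining.py | _remove_license_headers
-- ===== SOURCE A (Python) =====
-- def _remove_license_headers(content: str) -> str:
--     """Remove license/copyright headers while preserving functional comments."""
--     lines = content.splitlines()
--
--     # Find first and last lines containing license-related keywords
--     license_keywords = ['license', 'copyright', 'apache', 'licensed']
--     first_license_line = None
--     last_license_line = None
--
--     for i, line in enumerate(lines):
--         line_lower = line.lower()
--         if any(keyword in line_lower for keyword in license_keywords):
--             if first_license_line is None:
--                 first_license_line = i
--             last_license_line = i
--
--     # If license block found, remove it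
--     if first_license_line is not None and last_license_line is not None:
--         # Remove license block and any trailing empty lines
--         remaining_lines = lines[last_license_line + 1:]
--
--         # Skip empty lines after license block
--         while remaining_lines and not remaining_lines[0].strip():
--             remaining_lines.pop(0)
--
--         return '\n'.join(remaining_lines)
--
--     # No license found, return original content
--     return content
-- ===== SOURCE B (Python) =====
-- from itertools import dropwhile
--
-- _LICENSE_KEYWORDS = ('license', 'copyright', 'apache', 'licensed')
--
--
-- def _has_license_kw(line):
--     low = line.lower()
--     return any(kw in low for kw in _LICENSE_KEYWORDS)
--
--
-- def _remove_license_headers(content: str) -> str: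
--     """Remove license/copyright headers while preserving functional comments."""
--     lines = content.splitlines()
--     # scan from the end: the first hit from the back is the last license line
--     for i in range(len(lines) - 1, -1, -1):
--         if _has_license_kw(lines[i]):
--             rest = dropwhile(lambda l: not l.strip(), lines[i + 1:])
--             return '\n'.join(rest)
--     return content
-- ===== Notes on version B (the rewrite author's own statement) =====
-- stated objective: idiomatic
-- what changed: Scans the lines in reverse and stops at the first keyword hit from the end (dropping the dead first_license_line bookkeeping), then strips leading blank lines with itertools.dropwhile instead of a pop(0) loop.
import Mathlib
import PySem

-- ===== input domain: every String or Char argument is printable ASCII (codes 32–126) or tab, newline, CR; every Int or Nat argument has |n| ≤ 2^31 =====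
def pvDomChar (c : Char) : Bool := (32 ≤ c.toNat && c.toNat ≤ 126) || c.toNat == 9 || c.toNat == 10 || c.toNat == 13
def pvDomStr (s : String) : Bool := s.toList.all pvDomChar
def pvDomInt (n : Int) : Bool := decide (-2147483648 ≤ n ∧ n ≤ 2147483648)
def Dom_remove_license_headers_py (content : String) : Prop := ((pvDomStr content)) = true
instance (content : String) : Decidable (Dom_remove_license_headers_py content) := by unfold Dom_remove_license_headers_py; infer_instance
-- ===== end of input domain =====

-- B scans the lines in reverse, stopping at the first keyword hit from the end (no first/last
-- bookkeeping), and strips leading blank lines with dropWhile instead of a pop(0) loop; idiomatic, same cost.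

-- ===== PORT A =====
-- the keyword list shared by both sources
def pvKws : List String := ["license", "copyright", "apache", "licensed"]

-- one step of A's forward enumerate loop: state = (i, first_license_line, last_license_line)
def aStep (st : Nat × Option Nat × Option Nat) (line : String) : Nat × Option Nat × Option Nat :=
  let lineLower := PySem.Str.lower line
  if pvKws.any (fun kw => PySem.Str.isIn kw lineLower) then
    (st.1 + 1, (if st.2.1.isNone then some st.1 else st.2.1), some st.1)
  else
    (st.1 + 1, st.2.1, st.2.2)

-- A's "while remaining and not remaining[0].strip(): remaining.pop(0)" loop
def popBlankA : List String → List String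
  | [] => []
  | l :: rest => if PySem.Str.strip l = "" then popBlankA rest else l :: rest

def remove_license_headers_py (content : String) : String :=
  let lines := PySem.Str.splitlines content
  let st := lines.foldl aStep (0, none, none)
  match st.2.1, st.2.2 with
  | some _, some last =>
    let remaining := PySem.List.slice lines (some ((last : Int) + 1)) none
    PySem.Str.join "\n" (popBlankA remaining)
  | _, _ => content

-- ===== PORT B =====
def hasLicenseKw (line : String) : Bool :=
  let low := PySem.Str.lower line
  pvKws.any (fun kw => PySem.Str.isIn kw low)

-- B's reverse index loop as structural recursion: the lines after the LAST keyword line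
-- (the tail is inspected before the head, i.e. the scan runs from the end), none if no hit.
def tailAfterLastKw : List String → Option (List String)
  | [] => none
  | l :: rest =>
    match tailAfterLastKw rest with
    | some r => some r
    | none => if hasLicenseKw l then some rest else none

def remove_license_headers_py_alt (content : String) : String :=
  match tailAfterLastKw (PySem.Str.splitlines content) with
  | some rest => PySem.Str.join "\n" (rest.dropWhile (fun l => PySem.Str.strip l == ""))
  | none => content

-- ===== PRECONDITION & SPEC =====
def Spec_remove_license_headers_py (content : String) (out : String) : Prop := out = remove_license_headers_py_alt content
instance (content : String) (out : String) : Decidable (Spec_remove_license_headers_py content out) := by unfold Spec_remove_license_headers_py; infer_instance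

-- ===== CLAIM (what is proved, stated in full; the proofs are below) =====
def Claim_equal_remove_license_headers_py : Prop := ∀ (content : String), Dom_remove_license_headers_py content → Spec_remove_license_headers_py content (remove_license_headers_py content)

-- ===== LEMMAS AND PROOFS =====

lemma popBlankA_eq_dropWhile (l : List String) :
    popBlankA l = l.dropWhile (fun s => PySem.Str.strip s == "") := by
  induction l with
  | nil => rfl
  | cons x xs ih =>
    by_cases h : PySem.Str.strip x = ""
    · simp [popBlankA, List.dropWhile, h, ih]
    · have hb : (PySem.Str.strip x == "") = false := by simp [h]
      simp [popBlankA, List.dropWhile, h, hb]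

lemma tailAfterLastKw_suffix : ∀ (lines rest : List String),
    tailAfterLastKw lines = some rest →
    rest.length < lines.length ∧ lines.drop (lines.length - rest.length) = rest := by
  intro lines
  induction lines with
  | nil => intro rest h; simp [tailAfterLastKw] at h
  | cons x xs ih =>
    intro rest h
    simp only [tailAfterLastKw] at h
    cases htail : tailAfterLastKw xs with
    | some r =>
      rw [htail] at h
      have hr : rest = r := by
        simp only [Option.some.injEq] at h; exact h.symm
      subst hr
      obtain ⟨hlt, hdrop⟩ := ih rest htail
      refine ⟨by simp only [List.length_cons]; omega, ?_⟩
      have hx : (x :: xs).length - rest.length = (xs.length - rest.length) + 1 := by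
        simp only [List.length_cons]; omega
      rw [hx, List.drop_succ_cons, hdrop]
    | none =>
      rw [htail] at h
      by_cases hk : hasLicenseKw x = true
      · simp only [hk, if_true, Option.some.injEq] at h
        subst h
        refine ⟨by simp, ?_⟩
        have hx : (x :: xs).length - xs.length = 1 := by simp
        rw [hx]; rfl
      · simp [hk] at h

lemma fold_aStep_spec : ∀ (lines : List String) (i : Nat) (f l : Option Nat),
    ((lines.foldl aStep (i, f, l)).2.1.isSome = ((tailAfterLastKw lines).isSome || f.isSome))
    ∧ ((lines.foldl aStep (i, f, l)).2.2 =
        match tailAfterLastKw lines with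
        | some rest => some (i + (lines.length - rest.length) - 1)
        | none => l) := by
  intro lines
  induction lines with
  | nil => intro i f l; simp [tailAfterLastKw]
  | cons x xs ih =>
    intro i f l
    have hstep : aStep (i, f, l) x =
        if hasLicenseKw x then (i + 1, (if f.isNone then some i else f), some i)
        else (i + 1, f, l) := by
      simp [aStep, hasLicenseKw]
    cases htail : tailAfterLastKw xs with
    | some r =>
      obtain ⟨hlt, -⟩ := tailAfterLastKw_suffix xs r htail
      by_cases hk : hasLicenseKw x = true
      · obtain ⟨h1, h2⟩ := ih (i + 1) (if f.isNone then some i else f) (some i)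
        rw [htail] at h1 h2
        refine ⟨?_, ?_⟩
        · simp only [List.foldl_cons, hstep, hk, if_true, h1, tailAfterLastKw, htail]
          simp
        · simp only [List.foldl_cons, hstep, hk, if_true, h2, tailAfterLastKw, htail,
            List.length_cons, Option.some.injEq]
          omega
      · rw [Bool.not_eq_true] at hk
        obtain ⟨h1, h2⟩ := ih (i + 1) f l
        rw [htail] at h1 h2
        refine ⟨?_, ?_⟩
        · simp only [List.foldl_cons, hstep, hk, Bool.false_eq_true, if_false, h1,
            tailAfterLastKw, htail]
        · simp only [List.foldl_cons, hstep, hk, Bool.false_eq_true, if_false, h2,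
            tailAfterLastKw, htail, List.length_cons, Option.some.injEq]
          omega
    | none =>
      by_cases hk : hasLicenseKw x = true
      · obtain ⟨h1, h2⟩ := ih (i + 1) (if f.isNone then some i else f) (some i)
        rw [htail] at h1 h2
        refine ⟨?_, ?_⟩
        · simp only [List.foldl_cons, hstep, hk, if_true, h1, tailAfterLastKw, htail]
          cases f <;> simp
        · simp only [List.foldl_cons, hstep, hk, if_true, h2, tailAfterLastKw, htail,
            List.length_cons, Option.some.injEq]
          omega
      · rw [Bool.not_eq_true] at hk
        obtain ⟨h1, h2⟩ := ih (i + 1) f l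
        rw [htail] at h1 h2
        refine ⟨?_, ?_⟩
        · simp only [List.foldl_cons, hstep, hk, Bool.false_eq_true, if_false, h1,
            tailAfterLastKw, htail]
        · simp only [List.foldl_cons, hstep, hk, Bool.false_eq_true, if_false, h2,
            tailAfterLastKw, htail]

-- ===== VERDICT (by name: the statement is the Claim_ definition above) =====
theorem remove_license_headers_py_spec : Claim_equal_remove_license_headers_py := by
  unfold Claim_equal_remove_license_headers_py
  intro content _
  unfold Spec_remove_license_headers_py remove_license_headers_py remove_license_headers_py_alt
  set lines := PySem.Str.splitlines content with hlines
  obtain ⟨h1, h2⟩ := fold_aStep_spec lines 0 none none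
  cases htail : tailAfterLastKw lines with
  | none =>
    rw [htail] at h1 h2
    simp only [Option.isSome_none, Bool.or_self] at h1
    rw [Option.isSome_eq_false_iff, Option.isNone_iff_eq_none] at h1
    simp only [h2, h1]
  | some rest =>
    rw [htail] at h1 h2
    simp only [Option.isSome_some, Bool.true_or] at h1
    obtain ⟨a, ha⟩ := Option.isSome_iff_exists.mp h1
    obtain ⟨hlt, hdrop⟩ := tailAfterLastKw_suffix lines rest htail
    simp only [h2, ha]
    have hcast : ((((0 + (lines.length - rest.length) - 1) : Nat) : Int) + 1)
        = (((lines.length - rest.length : Nat)) : Int) := by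
      push_cast [Nat.zero_add]; omega
    rw [hcast, PySem.List.slice_from_natCast, hdrop, popBlankA_eq_dropWhile]
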